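-- pv_equiv track=rewrite | github.com/huytrao/RAG-Personal-Diary-Chatbot | src/Indexingstep/dataloading.py | _extract_content_from_structured_format
-- ===== SOURCE A (Python) =====
-- def _extract_content_from_structured_format(raw_content: str) -> tuple:
--     """
--     Extract actual content from structured format like:
--     Title: xxxx
--     Type: Text
--     Content: actual content here
--
--     Returns:
--         tuple: (title, actual_content)
--     """
--     lines = raw_content.strip().split('\n')
--     title = ""
--     content = ""
--
--     for line in lines:
--         if line.startswith("Title: "):
--             title = line.replace("Title: ", "").strip()
--         elif line.startswith("Content: "):
--             content = line.replace("Content: ", "").strip()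
--
--     # If no structured format found, return original content
--     if not content:
--         content = raw_content
--
--     return title, content
-- ===== SOURCE B (Python) =====
-- def _extract_content_from_structured_format(raw_content: str) -> tuple:
--     lines = raw_content.strip().split('\n')
--     titles = [l for l in lines if l.startswith("Title: ")]
--     contents = [l for l in lines if l.startswith("Content: ")]
--     title = titles[-1].replace("Title: ", "").strip() if titles else ""
--     content = contents[-1].replace("Content: ", "").strip() if contents else ""
--     if not content:
--         content = raw_content
--     return title, content
-- ===== Notes on version B (the rewrite author's own statement) =====
-- stated objective: idiomatic
-- what changed: Replaces A's single accumulator loop with elif branches by two declarative filters over the lines, taking the last title-marker and content-marker line of each kind and cleaning only that one.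
import Mathlib
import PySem

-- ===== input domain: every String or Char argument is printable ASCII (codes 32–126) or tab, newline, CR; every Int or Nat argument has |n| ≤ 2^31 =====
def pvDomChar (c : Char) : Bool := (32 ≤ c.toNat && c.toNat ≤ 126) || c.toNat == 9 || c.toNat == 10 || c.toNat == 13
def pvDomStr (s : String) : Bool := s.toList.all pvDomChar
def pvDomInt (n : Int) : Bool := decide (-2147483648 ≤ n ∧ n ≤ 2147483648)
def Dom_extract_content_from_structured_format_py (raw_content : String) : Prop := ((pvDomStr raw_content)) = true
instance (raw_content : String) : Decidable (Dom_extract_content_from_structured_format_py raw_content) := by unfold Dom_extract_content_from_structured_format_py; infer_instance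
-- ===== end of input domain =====

-- B replaces A's single accumulator loop with two filters taking the last matching line: more idiomatic, same cost.

-- ===== PORT A =====
-- one fold over the lines, overwriting title/content as in A's for/elif loop
def extract_content_from_structured_format_py (raw_content : String) : String × String :=
  let lines := (PySem.Str.split? (PySem.Str.strip raw_content) "\n").getD []  -- sep is the non-empty literal "\n": split? is always some
  let tc := lines.foldl (fun (s : String × String) line =>
    if PySem.Str.startswith line "Title: " then
      (PySem.Str.strip (PySem.Str.replace line "Title: " ""), s.2)
    else if PySem.Str.startswith line "Content: " then
      (s.1, PySem.Str.strip (PySem.Str.replace line "Content: " ""))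
    else s) ("", "")
  let content := if tc.2 = "" then raw_content else tc.2
  (tc.1, content)

-- ===== PORT B =====
-- filter the matching lines, take the last one of each kind (Python's titles[-1] guarded by nonemptiness)
def extract_content_from_structured_format_py_alt (raw_content : String) : String × String :=
  let lines := (PySem.Str.split? (PySem.Str.strip raw_content) "\n").getD []  -- sep is the non-empty literal "\n": split? is always some
  let titles := lines.filter (fun l => PySem.Str.startswith l "Title: ")
  let contents := lines.filter (fun l => PySem.Str.startswith l "Content: ")
  let title := match titles.getLast? with
    | none => ""
    | some l => PySem.Str.strip (PySem.Str.replace l "Title: " "")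
  let content := match contents.getLast? with
    | none => ""
    | some l => PySem.Str.strip (PySem.Str.replace l "Content: " "")
  (title, if content = "" then raw_content else content)

-- ===== PRECONDITION & SPEC =====
def Spec_extract_content_from_structured_format_py (raw_content : String) (out : String × String) : Prop := out = extract_content_from_structured_format_py_alt raw_content
instance (raw_content : String) (out : String × String) : Decidable (Spec_extract_content_from_structured_format_py raw_content out) := by unfold Spec_extract_content_from_structured_format_py; infer_instance

-- ===== CLAIM (what is proved, stated in full; the proofs are below) =====
def Claim_equal_extract_content_from_structured_format_py : Prop := ∀ (raw_content : String), Dom_extract_content_from_structured_format_py raw_content → Spec_extract_content_from_structured_format_py raw_content (extract_content_from_structured_format_py raw_content)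

-- ===== LEMMAS AND PROOFS =====

-- proof-side abbreviations
def pvT (l : String) : Bool := PySem.Str.startswith l "Title: "
def pvC (l : String) : Bool := PySem.Str.startswith l "Content: "

def pvStepA (s : String × String) (line : String) : String × String :=
  if pvT line then
    (PySem.Str.strip (PySem.Str.replace line "Title: " ""), s.2)
  else if pvC line then
    (s.1, PySem.Str.strip (PySem.Str.replace line "Content: " ""))
  else s

def pvLastT (xs : List String) (t : String) : String :=
  match xs.getLast? with
  | none => t
  | some l => PySem.Str.strip (PySem.Str.replace l "Title: " "")

def pvLastC (xs : List String) (c : String) : String :=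
  match xs.getLast? with
  | none => c
  | some l => PySem.Str.strip (PySem.Str.replace l "Content: " "")

theorem pvLastT_cons (l : String) (xs : List String) (t : String) :
    pvLastT (l :: xs) t = pvLastT xs (PySem.Str.strip (PySem.Str.replace l "Title: " "")) := by
  cases xs with
  | nil => rfl
  | cons a as =>
    simp only [pvLastT, List.getLast?_cons_cons]
    cases h : (a :: as).getLast? with
    | none => simp at h
    | some x => rfl

theorem pvLastC_cons (l : String) (xs : List String) (c : String) :
    pvLastC (l :: xs) c = pvLastC xs (PySem.Str.strip (PySem.Str.replace l "Content: " "")) := by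
  cases xs with
  | nil => rfl
  | cons a as =>
    simp only [pvLastC, List.getLast?_cons_cons]
    cases h : (a :: as).getLast? with
    | none => simp at h
    | some x => rfl

-- a line cannot start with both "Title: " and "Content: "
theorem pv_not_both (l : String) (hT : pvT l = true) : pvC l = false := by
  by_contra h
  rw [Bool.not_eq_false] at h
  simp only [pvT, pvC, PySem.Str.startswith_eq, PySem.Chars.startswith_iff] at hT h
  rcases (List.prefix_or_prefix_of_prefix hT h) with h' | h' <;> revert h' <;> decide

theorem pv_foldl_eq (lines : List String) (t c : String) :
    lines.foldl pvStepA (t, c) =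
      (pvLastT (lines.filter pvT) t, pvLastC (lines.filter pvC) c) := by
  induction lines generalizing t c with
  | nil => rfl
  | cons l ls ih =>
    rw [List.foldl_cons, List.filter_cons, List.filter_cons, ih]
    by_cases hT : pvT l = true
    · have hC := pv_not_both l hT
      rw [if_pos hT, if_neg (by simp [hC]), pvLastT_cons]
      have : pvStepA (t, c) l = (PySem.Str.strip (PySem.Str.replace l "Title: " ""), c) := by
        simp only [pvStepA]; rw [if_pos hT]

      rw [this]
    · by_cases hC : pvC l = true
      · rw [if_neg (by simp [hT]), if_pos hC, pvLastC_cons]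
        have : pvStepA (t, c) l = (t, PySem.Str.strip (PySem.Str.replace l "Content: " "")) := by
          simp only [pvStepA]
          rw [if_neg hT, if_pos hC]
        rw [this]
      · rw [if_neg (by simp [hT]), if_neg (by simp [hC])]
        have : pvStepA (t, c) l = (t, c) := by
          simp only [pvStepA]
          rw [if_neg hT, if_neg hC]
        rw [this]

-- ===== VERDICT (by name: the statement is the Claim_ definition above) =====
theorem pvLastT_none (xs : List String) (t : String) (h : xs.getLast? = none) :
    pvLastT xs t = t := by simp [pvLastT, h]
theorem pvLastT_some (xs : List String) (t l : String) (h : xs.getLast? = some l) :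
    pvLastT xs t = PySem.Str.strip (PySem.Str.replace l "Title: " "") := by simp [pvLastT, h]
theorem pvLastC_none (xs : List String) (c : String) (h : xs.getLast? = none) :
    pvLastC xs c = c := by simp [pvLastC, h]
theorem pvLastC_some (xs : List String) (c l : String) (h : xs.getLast? = some l) :
    pvLastC xs c = PySem.Str.strip (PySem.Str.replace l "Content: " "") := by simp [pvLastC, h]

theorem extract_content_from_structured_format_py_spec : Claim_equal_extract_content_from_structured_format_py := by
  intro raw_content _
  unfold Spec_extract_content_from_structured_format_py
  simp only [extract_content_from_structured_format_py, extract_content_from_structured_format_py_alt]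
  rw [show (fun (s : String × String) line =>
    if PySem.Str.startswith line "Title: " then
      (PySem.Str.strip (PySem.Str.replace line "Title: " ""), s.2)
    else if PySem.Str.startswith line "Content: " then
      (s.1, PySem.Str.strip (PySem.Str.replace line "Content: " ""))
    else s) = pvStepA from rfl]
  rw [pv_foldl_eq]
  rw [show (fun l => PySem.Str.startswith l "Title: ") = pvT from rfl,
      show (fun l => PySem.Str.startswith l "Content: ") = pvC from rfl]
  cases hT : (List.filter pvT ((PySem.Str.split? (PySem.Str.strip raw_content) "\n").getD [])).getLast? with
  | none =>
    rw [pvLastT_none _ _ hT]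
    cases hC : (List.filter pvC ((PySem.Str.split? (PySem.Str.strip raw_content) "\n").getD [])).getLast? with
    | none => rw [pvLastC_none _ _ hC]
    | some x => rw [pvLastC_some _ _ _ hC]
  | some y =>
    rw [pvLastT_some _ _ _ hT]
    cases hC : (List.filter pvC ((PySem.Str.split? (PySem.Str.strip raw_content) "\n").getD [])).getLast? with
    | none => rw [pvLastC_none _ _ hC]
    | some x => rw [pvLastC_some _ _ _ hC]
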